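-- pv_equiv track=rewrite | github.com/lemontreeran/aegisAI | agents/advisory_agent.py | _parse_alternatives_from_text
-- ===== SOURCE A (Python) =====
-- from typing import Dict, Any, List
--
-- def _parse_alternatives_from_text(text: str) -> List[Dict[str, Any]]:
--     """Parse alternatives from plain text response"""
--     alternatives = []
--     lines = text.strip().split('\n')
--
--     current_alt = {}
--     for line in lines:
--         line = line.strip()
--         if line.startswith('Title:') or line.startswith('1.') or line.startswith('2.') or line.startswith('3.'):
--             if current_alt:
--                 alternatives.append({
--                     "type": "ai_generated",
--                     **current_alt
--                 })
--                 current_alt = {}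
--             current_alt['title'] = line.split(':', 1)[-1].strip() if ':' in line else line
--         elif line.startswith('Description:'):
--             current_alt['description'] = line.split(':', 1)[-1].strip()
--         elif line.startswith('Example:'):
--             current_alt['example'] = line.split(':', 1)[-1].strip()
--
--     if current_alt:
--         alternatives.append({
--             "type": "ai_generated",
--             **current_alt
--         })
--
--     return alternatives[:3]
-- ===== SOURCE B (Python) =====
-- from typing import Dict, Any, List
--
-- def _classify(raw):
--     line = raw.strip()
--     if line.startswith('Title:') or line.startswith('1.') or line.startswith('2.') or line.startswith('3.'):
--         return ('title', line.split(':', 1)[-1].strip() if ':' in line else line)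
--     if line.startswith('Description:'):
--         return ('description', line.split(':', 1)[-1].strip())
--     if line.startswith('Example:'):
--         return ('example', line.split(':', 1)[-1].strip())
--     return None
--
-- def _parse_alternatives_from_text(text: str) -> List[Dict[str, Any]]:
--     """Parse alternatives from plain text response (two-pass: tokenize, group, render)"""
--     tokens = [t for t in map(_classify, text.strip().split('\n')) if t is not None]
--     groups = []
--     for tok in tokens:
--         if tok[0] == 'title' or not groups:
--             groups.append([tok])
--         else:
--             groups[-1].append(tok)
--     return [{"type": "ai_generated", **dict(g)} for g in groups][:3]
-- ===== Notes on version B (the rewrite author's own statement) =====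
-- stated objective: alternative
-- what changed: A's single stateful loop (mutating a current_alt dict and flushing it on title markers) is re-decomposed into three passes: tokenize each line into an optional (key, value) token, split the token stream into groups at title tokens, then render each group as a record dict.
import Mathlib
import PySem

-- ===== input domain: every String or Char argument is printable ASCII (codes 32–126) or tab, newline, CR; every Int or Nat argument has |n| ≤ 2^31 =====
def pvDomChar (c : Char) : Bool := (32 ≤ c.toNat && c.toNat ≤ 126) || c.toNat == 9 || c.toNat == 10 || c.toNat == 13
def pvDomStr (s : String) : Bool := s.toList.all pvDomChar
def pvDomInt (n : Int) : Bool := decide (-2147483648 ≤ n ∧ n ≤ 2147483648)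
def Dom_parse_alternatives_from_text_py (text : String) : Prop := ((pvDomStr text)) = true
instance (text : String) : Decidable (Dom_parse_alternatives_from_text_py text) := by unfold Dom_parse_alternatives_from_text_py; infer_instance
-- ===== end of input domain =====

-- B re-decomposes A's single stateful line loop into tokenize → group → render passes (objective: alternative decomposition, same cost).

-- ===== PORT A =====
-- one iteration of A's `for line in lines` loop over the state (alternatives, current_alt)
def pvAStep (st : List (PySem.Dict String String) × PySem.Dict String String) (rawLine : String) :
    List (PySem.Dict String String) × PySem.Dict String String :=
  let line := PySem.Str.strip rawLine
  if PySem.Str.startswith line "Title:" || PySem.Str.startswith line "1." ||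
     PySem.Str.startswith line "2." || PySem.Str.startswith line "3." then
    let st' := if st.2.size ≠ 0
      then (st.1 ++ [(PySem.Dict.empty.insert "type" "ai_generated").update st.2.items], PySem.Dict.empty)
      else st
    (st'.1, st'.2.insert "title" (if PySem.Str.isIn ":" line
        then PySem.Str.strip (PySem.List.pyGetD ((PySem.Str.splitMax? line ":" 1).getD []) (-1) "")
        else line))
  else if PySem.Str.startswith line "Description:" then
    (st.1, st.2.insert "description" (PySem.Str.strip (PySem.List.pyGetD ((PySem.Str.splitMax? line ":" 1).getD []) (-1) "")))
  else if PySem.Str.startswith line "Example:" then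
    (st.1, st.2.insert "example" (PySem.Str.strip (PySem.List.pyGetD ((PySem.Str.splitMax? line ":" 1).getD []) (-1) "")))
  else st

def parse_alternatives_from_text_py (text : String) : List (List (String × String)) :=
  let lines := (PySem.Str.split? (PySem.Str.strip text) "\n").getD []
  let st := lines.foldl pvAStep ([], PySem.Dict.empty)
  let alternatives := if st.2.size ≠ 0
    then st.1 ++ [(PySem.Dict.empty.insert "type" "ai_generated").update st.2.items]
    else st.1
  PySem.List.slice (alternatives.map PySem.Dict.items) none (some 3)

-- ===== PORT B =====
-- pass 1: classify one raw line into an optional (key, value) token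
def pvClassify (raw : String) : Option (String × String) :=
  let line := PySem.Str.strip raw
  if PySem.Str.startswith line "Title:" || PySem.Str.startswith line "1." ||
     PySem.Str.startswith line "2." || PySem.Str.startswith line "3." then
    some ("title", if PySem.Str.isIn ":" line
      then PySem.Str.strip (PySem.List.pyGetD ((PySem.Str.splitMax? line ":" 1).getD []) (-1) "")
      else line)
  else if PySem.Str.startswith line "Description:" then
    some ("description", PySem.Str.strip (PySem.List.pyGetD ((PySem.Str.splitMax? line ":" 1).getD []) (-1) ""))
  else if PySem.Str.startswith line "Example:" then
    some ("example", PySem.Str.strip (PySem.List.pyGetD ((PySem.Str.splitMax? line ":" 1).getD []) (-1) ""))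
  else none

-- pass 2: a title token (or a token before any group exists) opens a new group; others join the last group
def pvGroupStep (gs : List (List (String × String))) (tok : String × String) :
    List (List (String × String)) :=
  if tok.1 == "title" || gs.isEmpty then gs ++ [[tok]]
  else gs.dropLast ++ [gs.getLastD [] ++ [tok]]

-- pass 3: render one group as {"type": "ai_generated", **dict(g)}
def pvRender (g : List (String × String)) : List (String × String) :=
  ((PySem.Dict.empty.insert "type" "ai_generated").update (PySem.Dict.ofList g).items).items

def parse_alternatives_from_text_py_alt (text : String) : List (List (String × String)) :=
  let tokens := (((PySem.Str.split? (PySem.Str.strip text) "\n").getD []).map pvClassify).reduceOption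
  let groups := tokens.foldl pvGroupStep []
  PySem.List.slice (groups.map pvRender) none (some 3)

-- ===== PRECONDITION & SPEC =====
def Spec_parse_alternatives_from_text_py (text : String) (out : List (List (String × String))) : Prop := out = parse_alternatives_from_text_py_alt text
instance (text : String) (out : List (List (String × String))) : Decidable (Spec_parse_alternatives_from_text_py text out) := by unfold Spec_parse_alternatives_from_text_py; infer_instance

-- ===== CLAIM (what is proved, stated in full; the proofs are below) =====
def Claim_equal_parse_alternatives_from_text_py : Prop := ∀ (text : String), Dom_parse_alternatives_from_text_py text → Spec_parse_alternatives_from_text_py text (parse_alternatives_from_text_py text)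

-- ===== LEMMAS AND PROOFS =====

-- abstraction of A's loop state from B's group list: flushed records + the dict of the still-open last group
def pvRec (g : List (String × String)) : PySem.Dict String String :=
  (PySem.Dict.empty.insert "type" "ai_generated").update (PySem.Dict.ofList g).items

def pvAbsAlts (gs : List (List (String × String))) : List (PySem.Dict String String) :=
  gs.dropLast.map pvRec

def pvAbsCur (gs : List (List (String × String))) : PySem.Dict String String :=
  PySem.Dict.ofList (gs.getLastD [])

lemma pvOfList_append_singleton (g : List (String × String)) (t : String × String) :
    PySem.Dict.ofList (g ++ [t]) = (PySem.Dict.ofList g).insert t.1 t.2 := by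
  simp [PySem.Dict.ofList, PySem.Dict.update]

lemma pvSize_le_update (l : List (String × String)) :
    ∀ d : PySem.Dict String String, d.size ≤ (d.update l).size := by
  induction l with
  | nil => intro d; simp [PySem.Dict.update]
  | cons t rest ih =>
    intro d
    have h1 : d.size ≤ (d.insert t.1 t.2).size := by
      rw [PySem.Dict.size_insert]; split <;> omega
    have h2 := ih (d.insert t.1 t.2)
    calc d.size ≤ (d.insert t.1 t.2).size := h1
      _ ≤ ((d.insert t.1 t.2).update rest).size := h2
      _ = (d.update (t :: rest)).size := rfl

lemma pvSize_ofList_ne (t : String × String) (g : List (String × String)) :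
    (PySem.Dict.ofList (t :: g)).size ≠ 0 := by
  have h1 : (PySem.Dict.empty.insert t.1 t.2 : PySem.Dict String String).size = 1 := by
    rw [PySem.Dict.size_insert]; simp
  have h2 := pvSize_le_update g (PySem.Dict.empty.insert t.1 t.2)
  have h3 : PySem.Dict.ofList (t :: g) = (PySem.Dict.empty.insert t.1 t.2).update g := rfl
  rw [h3]; omega

lemma pvAbsCur_of_ne (gs : List (List (String × String))) (h : gs ≠ [])
    (hne : ∀ g ∈ gs, g ≠ []) : (pvAbsCur gs).size ≠ 0 := by
  have hg := hne _ (List.getLast_mem h)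
  unfold pvAbsCur
  rw [List.getLastD_eq_getLast?, List.getLast?_eq_some_getLast h]
  cases hl : gs.getLast h with
  | nil => exact absurd hl hg
  | cons a l => simp [pvSize_ofList_ne]

lemma pvGroupStep_ne (gs : List (List (String × String))) (t : String × String)
    (hne : ∀ g ∈ gs, g ≠ []) : ∀ g ∈ pvGroupStep gs t, g ≠ [] := by
  intro g hg
  unfold pvGroupStep at hg
  split at hg
  · rcases List.mem_append.1 hg with h | h
    · exact hne g h
    · simp at h; simp [h]
  · rcases List.mem_append.1 hg with h | h
    · exact hne g (List.mem_of_mem_dropLast h)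
    · simp at h; simp [h]

lemma pvMap_eq (gs : List (List (String × String))) (hg : gs ≠ []) :
    gs.map pvRec = pvAbsAlts gs ++ [pvRec (gs.getLastD [])] := by
  conv_lhs => rw [← List.dropLast_concat_getLast hg]
  rw [List.map_append]
  unfold pvAbsAlts
  rw [List.getLastD_eq_getLast?, List.getLast?_eq_some_getLast hg]
  rfl

-- B's grouping step seen through the state abstraction: a non-title token extends the open dict …
lemma pvKeyStep (gs : List (List (String × String))) (k v : String)
    (hk : (k == "title") = false) :
    (pvAbsAlts gs, (pvAbsCur gs).insert k v)
      = (pvAbsAlts (pvGroupStep gs (k, v)), pvAbsCur (pvGroupStep gs (k, v))) := by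
  rcases eq_or_ne gs [] with hgs | hgs
  · subst hgs
    rw [show pvGroupStep [] (k, v) = [[(k, v)]] from by simp [pvGroupStep]]
    rfl
  · rw [show pvGroupStep gs (k, v) = gs.dropLast ++ [gs.getLastD [] ++ [(k, v)]] from by
      simp [pvGroupStep, hk, hgs]]
    refine Prod.ext ?_ ?_
    · show pvAbsAlts gs = pvAbsAlts (gs.dropLast ++ [gs.getLastD [] ++ [(k, v)]])
      unfold pvAbsAlts; rw [List.dropLast_concat]
    · show (pvAbsCur gs).insert k v = pvAbsCur (gs.dropLast ++ [gs.getLastD [] ++ [(k, v)]])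
      unfold pvAbsCur
      simp only [List.getLastD_eq_getLast?]
      rw [List.getLast?_concat, Option.getD_some, pvOfList_append_singleton]

-- … and a title token closes it into a record and opens a fresh one
lemma pvTitleStep (gs : List (List (String × String))) (hne : ∀ g ∈ gs, g ≠ [])
    (v : String) :
    ((if (pvAbsCur gs).size ≠ 0
        then (pvAbsAlts gs ++ [(PySem.Dict.empty.insert "type" "ai_generated").update (pvAbsCur gs).items],
              (PySem.Dict.empty : PySem.Dict String String))
        else (pvAbsAlts gs, pvAbsCur gs)).1,
     (if (pvAbsCur gs).size ≠ 0
        then (pvAbsAlts gs ++ [(PySem.Dict.empty.insert "type" "ai_generated").update (pvAbsCur gs).items],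
              (PySem.Dict.empty : PySem.Dict String String))
        else (pvAbsAlts gs, pvAbsCur gs)).2.insert "title" v)
      = (pvAbsAlts (pvGroupStep gs ("title", v)), pvAbsCur (pvGroupStep gs ("title", v))) := by
  rw [show pvGroupStep gs ("title", v) = gs ++ [[("title", v)]] from by simp [pvGroupStep]]
  rcases eq_or_ne gs [] with hgs | hgs
  · subst hgs
    rw [if_neg (by simp [pvAbsCur, PySem.Dict.ofList, PySem.Dict.update, PySem.Dict.empty, PySem.Dict.size])]
    rfl
  · rw [if_pos (pvAbsCur_of_ne gs hgs hne)]
    refine Prod.ext ?_ ?_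
    · show pvAbsAlts gs ++ [pvRec (gs.getLastD [])] = pvAbsAlts (gs ++ [[("title", v)]])
      rw [← pvMap_eq gs hgs]
      unfold pvAbsAlts
      rw [List.dropLast_concat]
    · show PySem.Dict.empty.insert "title" v = pvAbsCur (gs ++ [[("title", v)]])
      unfold pvAbsCur
      rw [List.getLastD_eq_getLast?, List.getLast?_concat, Option.getD_some]
      rfl

lemma pvStep_none (l : String) (h : pvClassify l = none)
    (st : List (PySem.Dict String String) × PySem.Dict String String) :
    pvAStep st l = st := by
  simp only [pvClassify] at h
  simp only [pvAStep]
  split_ifs at h ⊢ <;> simp_all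

lemma pvStep_some (l : String) (t : String × String) (h : pvClassify l = some t)
    (gs : List (List (String × String))) (hne : ∀ g ∈ gs, g ≠ []) :
    pvAStep (pvAbsAlts gs, pvAbsCur gs) l
      = (pvAbsAlts (pvGroupStep gs t), pvAbsCur (pvGroupStep gs t)) := by
  simp only [pvClassify] at h
  simp only [pvAStep]
  by_cases h1 : (PySem.Str.startswith (PySem.Str.strip l) "Title:" ||
      PySem.Str.startswith (PySem.Str.strip l) "1." ||
      PySem.Str.startswith (PySem.Str.strip l) "2." ||
      PySem.Str.startswith (PySem.Str.strip l) "3.") = true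
  · rw [if_pos h1] at h ⊢
    injection h with h'
    subst h'
    exact pvTitleStep gs hne _
  · rw [if_neg h1] at h ⊢
    by_cases h2 : PySem.Str.startswith (PySem.Str.strip l) "Description:" = true
    · rw [if_pos h2] at h ⊢
      injection h with h'
      subst h'
      exact pvKeyStep gs _ _ rfl
    · rw [if_neg h2] at h ⊢
      by_cases h3 : PySem.Str.startswith (PySem.Str.strip l) "Example:" = true
      · rw [if_pos h3] at h ⊢
        injection h with h'
        subst h'
        exact pvKeyStep gs _ _ rfl
      · rw [if_neg h3] at h
        exact absurd h (by simp)

lemma pvMain (lines : List String) :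
    ∀ gs : List (List (String × String)), (∀ g ∈ gs, g ≠ []) →
    lines.foldl pvAStep (pvAbsAlts gs, pvAbsCur gs)
      = (pvAbsAlts (((lines.map pvClassify).reduceOption).foldl pvGroupStep gs),
         pvAbsCur (((lines.map pvClassify).reduceOption).foldl pvGroupStep gs)) := by
  induction lines with
  | nil => intro gs _; rfl
  | cons l rest ih =>
    intro gs hne
    cases hc : pvClassify l with
    | none =>
      rw [List.foldl_cons, pvStep_none l hc]
      simp only [List.map_cons, hc, List.reduceOption_cons_of_none]
      exact ih gs hne
    | some t =>
      rw [List.foldl_cons, pvStep_some l t hc gs hne]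
      simp only [List.map_cons, hc, List.reduceOption_cons_of_some, List.foldl_cons]
      exact ih (pvGroupStep gs t) (pvGroupStep_ne gs t hne)

lemma pvFold_ne (toks : List (String × String)) :
    ∀ gs : List (List (String × String)), (∀ g ∈ gs, g ≠ []) →
    ∀ g ∈ toks.foldl pvGroupStep gs, g ≠ [] := by
  induction toks with
  | nil => intro gs hne; exact hne
  | cons t rest ih => intro gs hne; exact ih _ (pvGroupStep_ne gs t hne)

-- ===== VERDICT (by name: the statement is the Claim_ definition above) =====
set_option maxHeartbeats 1600000 in
theorem parse_alternatives_from_text_py_spec : Claim_equal_parse_alternatives_from_text_py := by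
  intro text _
  unfold Spec_parse_alternatives_from_text_py parse_alternatives_from_text_py parse_alternatives_from_text_py_alt
  simp only []
  have h0 : (([], PySem.Dict.empty) : List (PySem.Dict String String) × PySem.Dict String String)
      = (pvAbsAlts [], pvAbsCur []) := rfl
  rw [h0, pvMain _ [] (by simp)]
  have hneG : ∀ g ∈ ((((PySem.Str.split? (PySem.Str.strip text) "\n").getD []).map pvClassify).reduceOption).foldl pvGroupStep [], g ≠ [] :=
    pvFold_ne _ [] (by simp)
  generalize hGG : ((((PySem.Str.split? (PySem.Str.strip text) "\n").getD []).map pvClassify).reduceOption).foldl pvGroupStep [] = G at hneG ⊢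
  rcases eq_or_ne G [] with hg | hg
  · rw [hg]
    rfl
  · rw [show ((pvAbsAlts G, pvAbsCur G).2) = pvAbsCur G from rfl,
        show ((pvAbsAlts G, pvAbsCur G).1) = pvAbsAlts G from rfl,
        if_pos (pvAbsCur_of_ne G hg hneG)]
    congr 1
    have hmap : pvAbsAlts G ++ [(PySem.Dict.empty.insert "type" "ai_generated").update (pvAbsCur G).items]
        = G.map pvRec := (pvMap_eq G hg).symm
    rw [hmap, List.map_map]
    rfl
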